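-- pv_equiv track=rewrite | github.com/vincenzorm117/CCI_6edition | CCI_6edition/chapter8/14_boolean_evaluation/python/solution.py | parse_boolean
-- ===== SOURCE A (Python) =====
-- def parse_boolean(expression):
--     values, operators = [], []
--     for char in expression:
--         if char == '1':
--             values.append(1)
--         elif char == '0':
--             values.append(0)
--         elif char == '&':
--             operators.append(0)
--         elif char == '|':
--             operators.append(1)
--         elif char == '^':
--             operators.append(2)
--     return (values, operators)
-- ===== SOURCE B (Python) =====
-- def parse_boolean(expression):
--     n = len(expression)
--     if n == 0:
--         return ([], [])
--     if n == 1: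
--         c = expression
--         if c == '0':
--             return ([0], [])
--         if c == '1':
--             return ([1], [])
--         if c == '&':
--             return ([], [0])
--         if c == '|':
--             return ([], [1])
--         if c == '^':
--             return ([], [2])
--         return ([], [])
--     mid = n // 2
--     v1, o1 = parse_boolean(expression[:mid])
--     v2, o2 = parse_boolean(expression[mid:])
--     return (v1 + v2, o1 + o2)
-- ===== Notes on version B (the rewrite author's own statement) =====
-- stated objective: alternative
-- what changed: Replaces A's single left-to-right dispatch loop with a divide-and-conquer recursion: split the string in half, parse each half recursively, and concatenate the two value lists and the two operator lists (correct because both outputs are order-preserving homomorphisms under string concatenation).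
import Mathlib
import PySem

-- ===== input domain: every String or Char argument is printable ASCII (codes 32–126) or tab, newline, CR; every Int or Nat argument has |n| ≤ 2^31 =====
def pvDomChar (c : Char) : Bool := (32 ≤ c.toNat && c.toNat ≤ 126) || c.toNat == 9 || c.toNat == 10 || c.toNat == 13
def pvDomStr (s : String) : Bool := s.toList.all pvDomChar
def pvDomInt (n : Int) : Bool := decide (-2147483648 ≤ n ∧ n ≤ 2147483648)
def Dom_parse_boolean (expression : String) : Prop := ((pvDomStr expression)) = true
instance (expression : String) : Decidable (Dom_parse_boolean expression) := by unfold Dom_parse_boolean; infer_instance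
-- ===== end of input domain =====

-- B replaces A's single left-to-right dispatch loop by a divide-and-conquer recursion
-- (split in half, recurse, concatenate); alternative decomposition, not claimed faster.

-- ===== PORT A =====
-- one pass, dispatching each char to one of the two accumulators
def parse_boolean (expression : String) : List Int × List Int :=
  expression.toList.foldl
    (fun (st : List Int × List Int) char =>
      if char = '1' then (st.1 ++ [1], st.2)
      else if char = '0' then (st.1 ++ [0], st.2)
      else if char = '&' then (st.1, st.2 ++ [0])
      else if char = '|' then (st.1, st.2 ++ [1])
      else if char = '^' then (st.1, st.2 ++ [2])
      else st)
    ([], [])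

-- ===== PORT B =====
-- divide and conquer on the char list: base cases for length 0 and 1, otherwise split at n // 2
def pbGo (l : List Char) : List Int × List Int :=
  match l with
  | [] => ([], [])
  | [c] =>
    if c = '0' then ([0], [])
    else if c = '1' then ([1], [])
    else if c = '&' then ([], [0])
    else if c = '|' then ([], [1])
    else if c = '^' then ([], [2])
    else ([], [])
  | c1 :: c2 :: rest =>
    let n := (c1 :: c2 :: rest).length
    let mid := n / 2
    let left := pbGo ((c1 :: c2 :: rest).take mid)
    let right := pbGo ((c1 :: c2 :: rest).drop mid)
    (left.1 ++ right.1, left.2 ++ right.2)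
termination_by l.length
decreasing_by
  · simp only [List.length_take, List.length_cons]; omega
  · simp only [List.length_drop, List.length_cons]; omega

def parse_boolean_alt (expression : String) : List Int × List Int :=
  pbGo expression.toList

-- ===== PRECONDITION & SPEC =====
def Spec_parse_boolean (expression : String) (out : List Int × List Int) : Prop := out = parse_boolean_alt expression
instance (expression : String) (out : List Int × List Int) : Decidable (Spec_parse_boolean expression out) := by unfold Spec_parse_boolean; infer_instance

-- ===== CLAIM (what is proved, stated in full; the proofs are below) =====
def Claim_equal_parse_boolean : Prop := ∀ (expression : String), Dom_parse_boolean expression → Spec_parse_boolean expression (parse_boolean expression)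

-- ===== LEMMAS AND PROOFS =====

-- common characterisation both ports are reduced to
def specV (l : List Char) : List Int :=
  (l.filter (fun c => c = '0' ∨ c = '1')).map (fun c => if c = '0' then (0 : Int) else 1)
def specO (l : List Char) : List Int :=
  (l.filter (fun c => c = '&' ∨ c = '|' ∨ c = '^')).map
    (fun c => if c = '&' then (0 : Int) else if c = '|' then 1 else 2)

theorem specV_append (a b : List Char) : specV (a ++ b) = specV a ++ specV b := by
  simp [specV, List.filter_append]
theorem specO_append (a b : List Char) : specO (a ++ b) = specO a ++ specO b := by
  simp [specO, List.filter_append]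

-- A's loop invariant: the fold appends exactly the two filtered passes
theorem parse_boolean_fold_eq (l : List Char) (v o : List Int) :
    l.foldl
      (fun (st : List Int × List Int) char =>
        if char = '1' then (st.1 ++ [1], st.2)
        else if char = '0' then (st.1 ++ [0], st.2)
        else if char = '&' then (st.1, st.2 ++ [0])
        else if char = '|' then (st.1, st.2 ++ [1])
        else if char = '^' then (st.1, st.2 ++ [2])
        else st)
      (v, o)
    = (v ++ specV l, o ++ specO l) := by
  induction l generalizing v o with
  | nil => simp [specV, specO]
  | cons c l ih =>
    by_cases h1 : c = '1'
    · subst h1; simp [ih, specV, specO]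
    · by_cases h0 : c = '0'
      · subst h0; simp [ih, specV, specO]
      · by_cases ha : c = '&'
        · subst ha; simp [ih, specV, specO]
        · by_cases hb : c = '|'
          · subst hb; simp [ih, specV, specO]
          · by_cases hc : c = '^'
            · subst hc; simp [ih, specV, specO]
            · simp [h1, h0, ha, hb, hc, ih, specV, specO]

-- B's divide-and-conquer computes the same characterisation (strong induction on length)
theorem pbGo_eq (l : List Char) : pbGo l = (specV l, specO l) := by
  suffices H : ∀ (n : Nat) (l : List Char), l.length ≤ n → pbGo l = (specV l, specO l) from
    H l.length l le_rfl
  intro n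
  induction n with
  | zero =>
    intro l h
    have : l = [] := List.eq_nil_of_length_eq_zero (Nat.le_zero.mp h)
    subst this; simp [pbGo, specV, specO]
  | succ n ih =>
    intro l h
    match l with
    | [] => simp [pbGo, specV, specO]
    | [c] =>
      by_cases h0 : c = '0'
      · subst h0; simp [pbGo, specV, specO]
      · by_cases h1 : c = '1'
        · subst h1; simp [pbGo, specV, specO]
        · by_cases ha : c = '&'
          · subst ha; simp [pbGo, specV, specO]
          · by_cases hb : c = '|'
            · subst hb; simp [pbGo, specV, specO]
            · by_cases hc : c = '^'
              · subst hc; simp [pbGo, specV, specO]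
              · simp [pbGo, specV, specO, h0, h1, ha, hb, hc]
    | c1 :: c2 :: rest =>
      rw [pbGo]
      have hlen : (c1 :: c2 :: rest).length = rest.length + 2 := by simp
      have htake : ((c1 :: c2 :: rest).take ((c1 :: c2 :: rest).length / 2)).length ≤ n := by
        simp only [List.length_take, hlen] at *; omega
      have hdrop : ((c1 :: c2 :: rest).drop ((c1 :: c2 :: rest).length / 2)).length ≤ n := by
        simp only [List.length_drop, hlen] at *; omega
      simp only [ih _ htake, ih _ hdrop]
      have hsplit : (c1 :: c2 :: rest).take ((c1 :: c2 :: rest).length / 2)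
          ++ (c1 :: c2 :: rest).drop ((c1 :: c2 :: rest).length / 2)
          = c1 :: c2 :: rest := List.take_append_drop _ _
      rw [← specV_append, ← specO_append, hsplit]

-- ===== VERDICT (by name: the statement is the Claim_ definition above) =====
theorem parse_boolean_spec : Claim_equal_parse_boolean := by
  intro e _
  show parse_boolean e = parse_boolean_alt e
  unfold parse_boolean parse_boolean_alt
  rw [parse_boolean_fold_eq, pbGo_eq]
  simp
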